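-- pv_equiv track=rewrite | github.com/Alok-Kumar2005/ContentWise-AI | utils/helpers.py | validate_user_answers
-- ===== SOURCE A (Python) =====
-- from typing import List, Dict, Tuple
--
-- def validate_user_answers(user_answers: Dict, total_questions: int) -> bool:
--     """Validate user answers format and completeness"""
--     if not isinstance(user_answers, dict):
--         return False
--
--     if len(user_answers) != total_questions:
--         return False
--
--     for i in range(total_questions):
--         key = str(i)
--         if key not in user_answers:
--             return False
--
--         answer = user_answers[key]
--         if not isinstance(answer, int) or answer not in [0, 1, 2, 3]:
--             return False
--
--     return True
-- ===== SOURCE B (Python) =====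
-- def _canonical_index(key):
--     """Decode a key that is the canonical decimal form of a non-negative int; else None."""
--     if not key or (len(key) > 1 and key[0] == '0'):
--         return None
--     n = 0
--     for c in key:
--         if not ('0' <= c <= '9'):
--             return None
--         n = n * 10 + (ord(c) - 48)
--     return n
--
--
-- def validate_user_answers(user_answers, total_questions):
--     """Validate user answers format and completeness"""
--     if not isinstance(user_answers, dict):
--         return False
--     if len(user_answers) != total_questions:
--         return False
--     # One pass over the items: every key must decode to an index < total_questions.
--     # Since dict keys are distinct and there are exactly total_questions of them,
--     # by pigeonhole they are exactly str(0) .. str(total_questions - 1).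
--     for k, v in user_answers.items():
--         i = _canonical_index(k) if isinstance(k, str) else None
--         if i is None or i >= total_questions:
--             return False
--         if not isinstance(v, int) or v not in (0, 1, 2, 3):
--             return False
--     return True
-- ===== Notes on version B (the rewrite author's own statement) =====
-- stated objective: alternative
-- what changed: Instead of iterating i over range(total_questions) with a membership test plus lookup for each expected key str(i), B makes a single pass over the dict items, decoding every key as a canonical non-negative decimal index and accepting iff each decoded index is < total_questions and each value is in {0,1,2,3} (completeness follows by pigeonhole from distinct keys and the length guard); Pre_ excludes association lists with duplicate keys, which represent no Python dict since a dict's keys are distinct, so the pigeonhole argument always applies.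
import Mathlib
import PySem

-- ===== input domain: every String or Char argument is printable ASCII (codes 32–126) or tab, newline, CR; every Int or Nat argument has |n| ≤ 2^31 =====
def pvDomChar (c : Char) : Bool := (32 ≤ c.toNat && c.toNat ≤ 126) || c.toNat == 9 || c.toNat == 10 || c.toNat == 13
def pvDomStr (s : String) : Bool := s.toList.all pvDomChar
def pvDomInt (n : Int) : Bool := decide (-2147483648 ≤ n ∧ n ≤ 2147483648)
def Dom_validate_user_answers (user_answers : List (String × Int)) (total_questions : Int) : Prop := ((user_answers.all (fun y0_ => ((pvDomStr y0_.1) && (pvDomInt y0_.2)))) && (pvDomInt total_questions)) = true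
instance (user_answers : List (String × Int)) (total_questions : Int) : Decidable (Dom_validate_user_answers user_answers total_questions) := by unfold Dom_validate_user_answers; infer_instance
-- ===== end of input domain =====

-- B replaces A's per-index membership-and-lookup loop by one pass over the items that decodes each key as a canonical decimal index (completeness by pigeonhole); same cost, different algorithm. Pre_ excludes duplicate-key association lists, which represent no Python dict.


-- ===== PORT A =====
-- body of A's 'for i in range(total_questions)' loop: membership test, dict lookup (first match), value check
def vuaLoop (ua : List (String × Int)) : List Int → Bool
  | [] => true
  | i :: rest =>
    match ua.find? (fun p => p.1 == PySem.Int.toStr i) with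
    | none => false                                             -- 'if key not in user_answers: return False'
    | some p =>                                                 -- 'answer = user_answers[key]'
      if [(0 : Int), 1, 2, 3].contains p.2 then vuaLoop ua rest -- 'answer not in [0,1,2,3]'
      else false

def validate_user_answers (user_answers : List (String × Int)) (total_questions : Int) : Bool :=
  -- 'isinstance(user_answers, dict)' is always true under the type convention
  if (user_answers.length : Int) ≠ total_questions then false
  else vuaLoop user_answers (PySem.List.pyRange 0 total_questions 1)

-- ===== PORT B =====
-- port of _canonical_index's digit loop: n = n * 10 + (ord(c) - 48), None on a non-digit char
def ciLoop : List Char → Nat → Option Nat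
  | [], n => some n
  | c :: cs, n => if '0' ≤ c && c ≤ '9' then ciLoop cs (n * 10 + (c.toNat - 48)) else none

-- port of _canonical_index: 'if not key or (len(key) > 1 and key[0] == "0"): return None'
def canonicalIndex? (key : String) : Option Nat :=
  match key.toList with
  | [] => none
  | c :: rest => if rest.length > 0 && c == '0' then none else ciLoop (c :: rest) 0

def validate_user_answers_alt (user_answers : List (String × Int)) (total_questions : Int) : Bool :=
  if (user_answers.length : Int) ≠ total_questions then false
  else
    user_answers.all (fun p =>
      match canonicalIndex? p.1 with
      | none => false                                            -- 'if i is None or i >= total_questions'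
      | some i => decide ((i : Int) < total_questions) && [(0 : Int), 1, 2, 3].contains p.2)

-- ===== PRECONDITION & SPEC =====
-- Pre_ states the dict representation invariant: a Python dict never holds two equal keys, so
-- association lists with duplicate keys represent no input of the Python function.
def Pre_validate_user_answers (user_answers : List (String × Int)) (total_questions : Int) : Prop :=
  (user_answers.map Prod.fst).Nodup
instance (user_answers : List (String × Int)) (total_questions : Int) : Decidable (Pre_validate_user_answers user_answers total_questions) := by unfold Pre_validate_user_answers; infer_instance

def pvWitness_validate_user_answers : (List (String × Int)) × Int := ([("0", 2)], 1)

def Spec_validate_user_answers (user_answers : List (String × Int)) (total_questions : Int) (out : Bool) : Prop := out = validate_user_answers_alt user_answers total_questions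
instance (user_answers : List (String × Int)) (total_questions : Int) (out : Bool) : Decidable (Spec_validate_user_answers user_answers total_questions out) := by unfold Spec_validate_user_answers; infer_instance

-- ===== CLAIM =====
def Claim_equal_validate_user_answers : Prop := ∀ (user_answers : List (String × Int)) (total_questions : Int), Dom_validate_user_answers user_answers total_questions → Pre_validate_user_answers user_answers total_questions → Spec_validate_user_answers user_answers total_questions (validate_user_answers user_answers total_questions)

-- ===== LEMMAS AND PROOFS =====

-- str(n) for n > 0 is the reversed decimal digit characters
lemma pv_toDigitsCore_eq : ∀ (n : Nat), 0 < n → ∀ (f : Nat) (l : List Char), n < f →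
    Nat.toDigitsCore 10 f n l = ((Nat.digits 10 n).map Nat.digitChar).reverse ++ l := by
  intro n
  induction n using Nat.strong_induction_on with
  | _ n ih =>
    intro hn f l hf
    match f with
    | f + 1 =>
      rw [show Nat.toDigitsCore 10 (f + 1) n l =
            (if n / 10 = 0 then (n % 10).digitChar :: l
             else Nat.toDigitsCore 10 f (n / 10) ((n % 10).digitChar :: l)) from rfl]
      rw [Nat.digits_def' (by norm_num) hn]
      by_cases h : n / 10 = 0
      · simp [h]
      · rw [if_neg h,
          ih (n / 10) (Nat.div_lt_self hn (by norm_num)) (Nat.pos_of_ne_zero h) f _ (by omega)]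
        simp

lemma pv_toDigits_eq (n : Nat) (hn : 0 < n) :
    Nat.toDigits 10 n = ((Nat.digits 10 n).map Nat.digitChar).reverse := by
  have := pv_toDigitsCore_eq n hn (n + 1) [] (by omega)
  simpa [Nat.toDigits] using this

lemma pv_toChars_nat (n : Nat) : PySem.Int.toChars (n : Int) = Nat.toDigits 10 n := by
  simp [PySem.Int.toChars]

lemma pv_digitChar_toNat : ∀ d < 10, (Nat.digitChar d).toNat = 48 + d := by decide

lemma pv_digitChar_isDigit : ∀ d < 10, ('0' ≤ Nat.digitChar d && Nat.digitChar d ≤ '9') = true := by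
  decide

lemma pv_char_eq_of_toNat (c d : Char) (h : c.toNat = d.toNat) : c = d :=
  Char.ext (UInt32.toNat_inj.mp h)

lemma pv_digitChar_sub (c : Char) (h : ('0' ≤ c && c ≤ '9') = true) :
    Nat.digitChar (c.toNat - 48) = c := by
  simp only [Bool.and_eq_true, decide_eq_true_eq] at h
  have h0 : 48 ≤ c.toNat := h.1
  have h9 : c.toNat ≤ 57 := h.2
  have hd : c.toNat - 48 < 10 := by omega
  apply pv_char_eq_of_toNat
  rw [pv_digitChar_toNat _ hd]
  omega

-- ciLoop characterization: succeeds iff every char is a digit, with Horner value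
lemma pv_ciLoop_some_iff (cs : List Char) : ∀ (n i : Nat),
    ciLoop cs n = some i ↔
      ((∀ c ∈ cs, ('0' ≤ c && c ≤ '9') = true) ∧
        i = cs.foldl (fun a c => a * 10 + (c.toNat - 48)) n) := by
  induction cs with
  | nil =>
    intro n i
    show some n = some i ↔ _
    simp only [Option.some.injEq, List.foldl_nil]
    constructor
    · intro h; exact ⟨by simp, h.symm⟩
    · rintro ⟨-, rfl⟩; rfl
  | cons c cs ih =>
    intro n i
    simp only [ciLoop, List.foldl_cons, List.mem_cons]
    by_cases hc : ('0' ≤ c && c ≤ '9') = true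
    · rw [if_pos hc, ih]
      constructor
      · rintro ⟨h1, h2⟩; exact ⟨fun x hx => by rcases hx with rfl | hx; exact hc; exact h1 x hx, h2⟩
      · rintro ⟨h1, h2⟩; exact ⟨fun x hx => h1 x (Or.inr hx), h2⟩
    · rw [if_neg hc]
      constructor
      · intro h; cases h
      · rintro ⟨h1, _⟩; exact absurd (h1 c (Or.inl rfl)) hc

-- Horner fold over reversed digit characters computes ofDigits
lemma pv_foldl_val (ds : List Nat) (h : ∀ d ∈ ds, d < 10) : ∀ (n : Nat),
    ((ds.map Nat.digitChar).reverse).foldl (fun a c => a * 10 + (c.toNat - 48)) n =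
      n * 10 ^ ds.length + Nat.ofDigits 10 ds := by
  induction ds with
  | nil => intro n; simp
  | cons d ds ih =>
    intro n
    have hd : d < 10 := h d (by simp)
    have hds : ∀ e ∈ ds, e < 10 := fun e he => h e (by simp [he])
    rw [List.map_cons, List.reverse_cons, List.foldl_append, ih hds]
    simp only [List.foldl_cons, List.foldl_nil, pv_digitChar_toNat d hd, List.length_cons]
    have h48 : 48 + d - 48 = d := by omega
    rw [h48, Nat.ofDigits_cons, pow_succ]
    ring

-- L1: decoding str(i) gives back i, for every natural i
lemma pv_canonicalIndex_toStr (i : Nat) :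
    canonicalIndex? (PySem.Int.toStr (i : Int)) = some i := by
  unfold canonicalIndex?
  rw [PySem.Int.toList_toStr, pv_toChars_nat]
  rcases Nat.eq_zero_or_pos i with rfl | hi
  · decide
  · rw [pv_toDigits_eq i hi]
    have hne : Nat.digits 10 i ≠ [] := Nat.digits_ne_nil_iff_ne_zero.mpr (by omega)
    rcases List.eq_nil_or_concat (Nat.digits 10 i) with h | ⟨L, a, hLa⟩
    · exact absurd h hne
    · have hlast : a ≠ 0 := by
        have h1 := Nat.getLast_digit_ne_zero 10 (m := i) (by omega)
        have hgl? : (Nat.digits 10 i).getLast? = some a := by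
          rw [hLa]; simp
        have h2 := List.getLast?_eq_some_getLast hne
        rw [hgl?] at h2
        rw [Option.some_inj.mp h2]
        exact h1
      have ha : a < 10 := Nat.digits_lt_base (by norm_num) (by rw [hLa]; simp)
      have hall : ∀ d ∈ Nat.digits 10 i, d < 10 := fun d hd => Nat.digits_lt_base (by norm_num) hd
      rw [hLa]
      simp only [List.concat_eq_append, List.map_append, List.map_cons, List.map_nil,
        List.reverse_append, List.reverse_cons, List.reverse_nil, List.nil_append,
        List.cons_append]
      have hguard : ((((L.map Nat.digitChar).reverse).length > 0 : Bool) && (Nat.digitChar a == '0')) = false := by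
        have : Nat.digitChar a ≠ '0' := by
          intro hEq
          apply hlast
          have := congrArg Char.toNat hEq
          rw [pv_digitChar_toNat a ha] at this
          simpa using this
        simp [this]
      rw [hguard]
      simp only [Bool.false_eq_true, if_false]
      rw [show (Nat.digitChar a :: (L.map Nat.digitChar).reverse)
            = ((L.concat a).map Nat.digitChar).reverse by simp]
      rw [(pv_ciLoop_some_iff _ 0 i)]
      refine ⟨?_, ?_⟩
      · intro c hc
        rw [List.mem_reverse] at hc
        obtain ⟨d, hd, rfl⟩ := List.mem_map.mp hc
        exact pv_digitChar_isDigit d (hall d (by rw [hLa]; exact hd))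
      · rw [pv_foldl_val (L.concat a) (fun d hd => hall d (by rw [hLa]; exact hd)) 0]
        rw [← hLa]
        simp [Nat.ofDigits_digits]

-- L2: a successful decode means the key IS str(i) (canonicity)
lemma pv_canonicalIndex_eq_toStr (k : String) (i : Nat)
    (h : canonicalIndex? k = some i) : k = PySem.Int.toStr (i : Int) := by
  apply String.toList_inj.mp
  rw [PySem.Int.toList_toStr, pv_toChars_nat]
  unfold canonicalIndex? at h
  rcases hk : k.toList with _ | ⟨c, rest⟩
  · rw [hk] at h; cases h
  · rw [hk] at h
    dsimp only at h
    by_cases hg : ((rest.length > 0 : Bool) && (c == '0')) = true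
    · rw [if_pos hg] at h; cases h
    · rw [if_neg hg] at h
      rw [pv_ciLoop_some_iff] at h
      obtain ⟨hdig, hval⟩ := h
      -- digit values of the key, least-significant first
      set ds := ((c :: rest).map (fun x => x.toNat - 48)).reverse with hds
      have hcs : (c :: rest) = (ds.map Nat.digitChar).reverse := by
        rw [hds]
        simp only [List.map_reverse, List.reverse_reverse, List.map_map]
        calc c :: rest = List.map id (c :: rest) := by rw [List.map_id]
          _ = List.map (Nat.digitChar ∘ fun x => x.toNat - 48) (c :: rest) := by
              refine List.map_congr_left ?_
              intro x hx
              exact (pv_digitChar_sub x (hdig x hx)).symm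
      have hdlt : ∀ d ∈ ds, d < 10 := by
        intro d hd
        rw [hds, List.mem_reverse] at hd
        obtain ⟨x, hx, rfl⟩ := List.mem_map.mp hd
        have := hdig x hx
        simp only [Bool.and_eq_true, decide_eq_true_eq] at this
        have h9 : x.toNat ≤ 57 := this.2
        omega
      have hival : i = Nat.ofDigits 10 ds := by
        rw [hval, hcs, pv_foldl_val ds hdlt 0]; simp
      by_cases hz : c = '0' ∧ rest = []
      · -- the key "0": i = 0
        obtain ⟨rfl, rfl⟩ := hz
        have hi0 : i = 0 := by rw [hval]; rfl
        subst hi0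
        decide
      · -- leading digit nonzero: digits 10 i = ds
        have hcne : c ≠ '0' ∨ rest ≠ [] := by tauto
        have hdsne : ds ≠ [] := by rw [hds]; simp
        have hcd := hdig c (by simp)
        simp only [Bool.and_eq_true, decide_eq_true_eq] at hcd
        have h0c : 48 ≤ c.toNat := hcd.1
        have h9c : c.toNat ≤ 57 := hcd.2
        -- the guard (or the single-char case) forces the leading digit nonzero
        have hc0' : c ≠ '0' := by
          rcases hcne with hc0 | hrne
          · exact hc0
          · intro hc
            apply hg
            simp [hc, List.length_pos_iff.mpr hrne]
        have hgl? : ds.getLast? = some (c.toNat - 48) := by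
          rw [hds, List.getLast?_reverse]
          rfl
        have hlast : ds.getLast hdsne ≠ 0 := by
          have h2 := List.getLast?_eq_some_getLast hdsne
          rw [hgl?] at h2
          rw [← Option.some_inj.mp h2]
          intro h0
          apply hc0'
          apply pv_char_eq_of_toNat
          show c.toNat = 48
          omega
        have hdigeq : Nat.digits 10 i = ds := by
          rw [hival]
          exact Nat.digits_ofDigits 10 (by norm_num) ds hdlt (fun _ => hlast)
        have hipos : 0 < i := by
          rcases Nat.eq_zero_or_pos i with rfl | h
          · exfalso; rw [Nat.digits_zero] at hdigeq; exact hdsne hdigeq.symm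
          · exact h
        rw [pv_toDigits_eq i hipos, hdigeq]
        exact hcs

-- str is injective on the naturals, via the decoder
lemma pv_toStr_nat_inj (a b : Nat)
    (h : PySem.Int.toStr (a : Int) = PySem.Int.toStr (b : Int)) : a = b := by
  have := congrArg canonicalIndex? h
  rw [pv_canonicalIndex_toStr, pv_canonicalIndex_toStr] at this
  exact Option.some_inj.mp this

-- A's early-exit loop equals an 'all' over the index range
lemma pv_vuaLoop_eq_all (ua : List (String × Int)) (is : List Int) :
    vuaLoop ua is = is.all (fun i =>
      match ua.find? (fun p => p.1 == PySem.Int.toStr i) with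
      | none => false
      | some p => [(0 : Int), 1, 2, 3].contains p.2) := by
  induction is with
  | nil => rfl
  | cons i rest ih =>
    simp only [vuaLoop, List.all_cons, ih]
    cases h : ua.find? (fun p => p.1 == PySem.Int.toStr i) with
    | none => rfl
    | some p => by_cases hc : [(0 : Int), 1, 2, 3].contains p.2 = true <;> simp_all

-- the crux: with distinct keys and the length guard passed, A's per-index
-- lookup loop equals B's single decode-every-key pass (pigeonhole on the keys)
lemma pv_main (ua : List (String × Int)) (hnd : (ua.map Prod.fst).Nodup) :
    vuaLoop ua (PySem.List.pyRange 0 (ua.length : Int) 1) =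
      ua.all (fun p =>
        match canonicalIndex? p.1 with
        | none => false
        | some i => decide ((i : Int) < (ua.length : Int)) && [(0 : Int), 1, 2, 3].contains p.2) := by
  rw [pv_vuaLoop_eq_all, PySem.List.pyRange_zero_natCast]
  have hginj : Function.Injective (fun k : Nat => PySem.Int.toStr (k : Int)) :=
    fun a b h => pv_toStr_nat_inj a b h
  have hEnodup : ((List.range ua.length).map (fun k : Nat => PySem.Int.toStr (k : Int))).Nodup :=
    List.Nodup.map hginj List.nodup_range
  have hEcard : ((List.range ua.length).map (fun k : Nat => PySem.Int.toStr (k : Int))).toFinset.card = ua.length := by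
    rw [List.toFinset_card_of_nodup hEnodup]; simp
  have hKcard : (ua.map Prod.fst).toFinset.card = ua.length := by
    rw [List.toFinset_card_of_nodup hnd]; simp
  apply Bool.coe_iff_coe.mp
  rw [List.all_eq_true, List.all_eq_true]
  constructor
  · -- A accepts → every key decodes below the bound with a good value
    intro hA
    have hfind : ∀ k, k < ua.length → ∃ p, ua.find? (fun p => p.1 == PySem.Int.toStr (k : Int)) = some p ∧
        p ∈ ua ∧ p.1 = PySem.Int.toStr (k : Int) ∧ [(0 : Int), 1, 2, 3].contains p.2 = true := by
      intro k hk
      have hm : ((k : Int)) ∈ List.map (fun k : Nat => (k : Int)) (List.range ua.length) :=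
        List.mem_map_of_mem (List.mem_range.mpr hk)
      have := hA _ hm
      cases hfq : ua.find? (fun p => p.1 == PySem.Int.toStr (k : Int)) with
      | none => rw [hfq] at this; simp at this
      | some p =>
        rw [hfq] at this
        exact ⟨p, rfl, List.mem_of_find?_eq_some hfq, by simpa using List.find?_some hfq, this⟩
    -- every expected key str(k) occurs among the dict keys …
    have hsub : ((List.range ua.length).map (fun k : Nat => PySem.Int.toStr (k : Int))).toFinset ⊆
        (ua.map Prod.fst).toFinset := by
      intro x hx
      rw [List.mem_toFinset] at hx ⊢
      obtain ⟨k, hk, rfl⟩ := List.mem_map.mp hx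
      obtain ⟨p, _, hpm, hpk, _⟩ := hfind k (List.mem_range.mp hk)
      exact List.mem_map.mpr ⟨p, hpm, hpk⟩
    -- … and by cardinality the two key sets coincide
    have hfeq : ((List.range ua.length).map (fun k : Nat => PySem.Int.toStr (k : Int))).toFinset =
        (ua.map Prod.fst).toFinset :=
      Finset.eq_of_subset_of_card_le hsub (by rw [hEcard, hKcard])
    intro p hp
    have hp1 : p.1 ∈ (List.range ua.length).map (fun k : Nat => PySem.Int.toStr (k : Int)) := by
      have : p.1 ∈ (ua.map Prod.fst).toFinset :=
        List.mem_toFinset.mpr (List.mem_map_of_mem hp)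
      exact List.mem_toFinset.mp (hfeq ▸ this)
    obtain ⟨k, hk, hkey⟩ := List.mem_map.mp hp1
    rw [← hkey, pv_canonicalIndex_toStr]
    obtain ⟨q, _, hqm, hqk, hqv⟩ := hfind k (List.mem_range.mp hk)
    have hpq : p = q :=
      List.inj_on_of_nodup_map hnd hp hqm (by rw [hqk, ← hkey])
    rw [hpq]
    simp only [hqv, Bool.and_true, decide_eq_true_eq]
    exact_mod_cast List.mem_range.mp hk
  · -- every key decodes below the bound → A finds each expected key with a good value
    intro hB
    have hdec : ∀ p ∈ ua, ∃ ip : Nat, p.1 = PySem.Int.toStr (ip : Int) ∧ ip < ua.length ∧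
        [(0 : Int), 1, 2, 3].contains p.2 = true := by
      intro p hp
      have := hB p hp
      cases hci : canonicalIndex? p.1 with
      | none => rw [hci] at this; simp at this
      | some ip =>
        rw [hci] at this
        simp only [Bool.and_eq_true, decide_eq_true_eq] at this
        exact ⟨ip, pv_canonicalIndex_eq_toStr p.1 ip hci, by exact_mod_cast this.1, this.2⟩
    have hsub : (ua.map Prod.fst).toFinset ⊆
        ((List.range ua.length).map (fun k : Nat => PySem.Int.toStr (k : Int))).toFinset := by
      intro x hx
      rw [List.mem_toFinset] at hx ⊢
      obtain ⟨p, hp, rfl⟩ := List.mem_map.mp hx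
      obtain ⟨ip, hpk, hplt, _⟩ := hdec p hp
      exact List.mem_map.mpr ⟨ip, List.mem_range.mpr hplt, hpk.symm⟩
    have hfeq : (ua.map Prod.fst).toFinset =
        ((List.range ua.length).map (fun k : Nat => PySem.Int.toStr (k : Int))).toFinset :=
      Finset.eq_of_subset_of_card_le hsub (by rw [hEcard, hKcard])
    intro i hi
    obtain ⟨k, hk, rfl⟩ := List.mem_map.mp hi
    have hkey : PySem.Int.toStr (k : Int) ∈ ua.map Prod.fst := by
      have h1 : PySem.Int.toStr (k : Int) ∈
          ((List.range ua.length).map (fun j : Nat => PySem.Int.toStr (j : Int))).toFinset :=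
        List.mem_toFinset.mpr (List.mem_map.mpr ⟨k, hk, rfl⟩)
      exact List.mem_toFinset.mp (hfeq ▸ h1)
    obtain ⟨p, hp, hpk⟩ := List.mem_map.mp hkey
    have hsome : (ua.find? (fun q => q.1 == PySem.Int.toStr (k : Int))).isSome :=
      List.find?_isSome.mpr ⟨p, hp, by simp [hpk]⟩
    obtain ⟨q, hq⟩ := Option.isSome_iff_exists.mp hsome
    rw [hq]
    obtain ⟨_, _, _, hqv⟩ := hdec q (List.mem_of_find?_eq_some hq)
    exact hqv

-- ===== VERDICT =====
theorem validate_user_answers_spec : Claim_equal_validate_user_answers := by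
  intro ua tq _ hpre
  unfold Spec_validate_user_answers validate_user_answers validate_user_answers_alt
  by_cases h : (ua.length : Int) ≠ tq
  · simp [h]
  · rw [not_not] at h
    subst h
    simp only [ne_eq, not_true_eq_false, if_false]
    exact pv_main ua hpre
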